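-- pv_equiv track=rewrite | github.com/elvis-gene/coding-practice | binarysearch.com/Mixed_ Sorting.py | solve
-- ===== SOURCE A (Python) =====
-- def solve(nums):
--
--     odds = [num for num in nums if num%2 != 0]
--     # Sort odds in descending order
--     odds.sort(reverse=True)
--
--     evens = [num for num in nums if num%2 == 0]
--     # Sort evens in ascending order
--     evens.sort()
--
--     output = []
--
--     for num in nums:
--         if num%2 == 0:
--             output.append(evens[0])
--             evens.pop(0)
--         else:
--             output.append(odds[0])
--             odds.pop(0)
--
--     return output
-- ===== SOURCE B (Python) =====
-- def solve(nums):
--     se = sorted(x for x in nums if x % 2 == 0)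
--     so = sorted((x for x in nums if x % 2 != 0), reverse=True)
--     epos = [i for i in range(len(nums)) if nums[i] % 2 == 0]
--     opos = [i for i in range(len(nums)) if nums[i] % 2 != 0]
--     res = [0] * len(nums)
--     for p, v in zip(epos, se):
--         res[p] = v
--     for p, v in zip(opos, so):
--         res[p] = v
--     return res
-- ===== Notes on version B (the rewrite author's own statement) =====
-- stated objective: faster
-- what changed: B replaces A's per-element loop that pops the next value from the front of the two sorted lists (quadratic pop(0)) with a position-scatter: it computes the index lists of the even and odd positions and writes the sorted values directly into a preallocated result at those positions.
import Mathlib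
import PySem

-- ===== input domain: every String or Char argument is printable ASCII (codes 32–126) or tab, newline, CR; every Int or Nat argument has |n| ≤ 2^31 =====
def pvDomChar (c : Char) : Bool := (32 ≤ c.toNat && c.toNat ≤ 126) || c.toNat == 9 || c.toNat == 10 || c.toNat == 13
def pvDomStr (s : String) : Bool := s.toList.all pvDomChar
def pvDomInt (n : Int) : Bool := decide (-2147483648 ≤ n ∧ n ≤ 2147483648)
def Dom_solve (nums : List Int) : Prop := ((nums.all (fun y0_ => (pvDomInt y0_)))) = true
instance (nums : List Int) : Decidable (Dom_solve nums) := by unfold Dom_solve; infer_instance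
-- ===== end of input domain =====

-- B rebuilds the result by scattering the sorted even/odd values into their original
-- parity positions instead of A's loop that pops from the front of the sorted lists.

-- ===== PORT A =====
-- the for-loop of A: appends evens[0]/odds[0] and pops it (pop(0) = tail; the
-- indexing evens[0] is total here with default 0 — never reached, since the lists
-- were filtered from the same nums)
def solveLoop : List Int → List Int → List Int → List Int
  | [], _, _ => []
  | num :: rest, evens, odds =>
    if PySem.Int.mod num 2 == 0 then
      PySem.List.pyGetD evens 0 0 :: solveLoop rest evens.tail odds
    else
      PySem.List.pyGetD odds 0 0 :: solveLoop rest evens odds.tail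

def solve (nums : List Int) : List Int :=
  let odds := PySem.List.sorted (nums.filter (fun num => PySem.Int.mod num 2 != 0)) (fun x => x) true
  let evens := PySem.List.sorted (nums.filter (fun num => PySem.Int.mod num 2 == 0)) (fun x => x) false
  solveLoop nums evens odds

-- ===== PORT B =====
-- one 'for p, v in zip(ps, vs): res[p] = v' loop of B
def scatter (ps vs res : List Int) : List Int :=
  (ps.zip vs).foldl (fun r pv => PySem.List.pySetD r pv.1 pv.2) res

def solve_alt (nums : List Int) : List Int :=
  let se := PySem.List.sorted (nums.filter (fun x => PySem.Int.mod x 2 == 0)) (fun x => x) false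
  let so := PySem.List.sorted (nums.filter (fun x => PySem.Int.mod x 2 != 0)) (fun x => x) true
  let epos := (PySem.List.pyRange 0 (nums.length : Int) 1).filter
      (fun i => PySem.Int.mod (PySem.List.pyGetD nums i 0) 2 == 0)
  let opos := (PySem.List.pyRange 0 (nums.length : Int) 1).filter
      (fun i => PySem.Int.mod (PySem.List.pyGetD nums i 0) 2 != 0)
  scatter opos so (scatter epos se (List.replicate nums.length 0))

-- ===== PRECONDITION & SPEC =====
def Spec_solve (nums : List Int) (out : List Int) : Prop := out = solve_alt nums
instance (nums : List Int) (out : List Int) : Decidable (Spec_solve nums out) := by unfold Spec_solve; infer_instance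

-- ===== CLAIM (what is proved, stated in full; the proofs are below) =====
def Claim_equal_solve : Prop := ∀ (nums : List Int), Dom_solve nums → Spec_solve nums (solve nums)

-- ===== LEMMAS AND PROOFS =====

-- proof-side name for B's position lists
def posOf (q : Int → Bool) (ns : List Int) : List Int :=
  (PySem.List.pyRange 0 (ns.length : Int) 1).filter (fun i => q (PySem.List.pyGetD ns i 0))

lemma posOf_nil (q : Int → Bool) : posOf q [] = [] := by
  simp [posOf, PySem.List.pyRange_one_eq_nil]

lemma posOf_nonneg (q : Int → Bool) (ns : List Int) : ∀ p ∈ posOf q ns, 0 ≤ p := by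
  intro p hp
  have := List.of_mem_filter (by exact hp)
  have hm := List.mem_of_mem_filter hp
  have := (PySem.List.mem_pyRange_one).1 hm
  omega

lemma posOf_cons (q : Int → Bool) (n : Int) (t : List Int) :
    posOf q (n :: t) =
      (if q n then [(0:Int)] else []) ++ (posOf q t).map (fun p => p + 1) := by
  unfold posOf
  have hlen : ((n :: t).length : Int) = (t.length : Int) + 1 := by simp
  rw [hlen, PySem.List.pyRange_one_cons (by positivity)]
  have hshift : PySem.List.pyRange 1 ((t.length : Int) + 1) 1
      = (PySem.List.pyRange 0 (t.length : Int) 1).map (fun p => p + 1) := by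
    rw [PySem.List.pyRange_one, PySem.List.pyRange_one]
    have : ((t.length : Int) + 1 - 1).toNat = ((t.length : Int) - 0).toNat := by omega
    rw [this, List.map_map]
    exact List.map_congr_left (fun k _ => by simp; omega)
  have h01 : (0:Int) + 1 = 1 := by norm_num
  rw [h01, hshift, List.filter_cons, List.filter_map]
  have hget0 : PySem.List.pyGetD (n :: t) 0 0 = n := by
    simp [PySem.List.pyGetD_of_nonneg]
  have hfc : (PySem.List.pyRange 0 (t.length : Int) 1).filter
       ((fun i => q (PySem.List.pyGetD (n :: t) i 0)) ∘ (fun p => p + 1))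
      = (PySem.List.pyRange 0 (t.length : Int) 1).filter (fun i => q (PySem.List.pyGetD t i 0)) := by
    apply List.filter_congr
    intro p hp
    have hp' := (PySem.List.mem_pyRange_one).1 hp
    have h1 : (p + 1).toNat = p.toNat + 1 := by omega
    simp [Function.comp, PySem.List.pyGetD_of_nonneg _ _ (by omega : (0:Int) ≤ p + 1),
          PySem.List.pyGetD_of_nonneg _ _ (by omega : (0:Int) ≤ p), h1]
  rw [hfc, hget0]
  split <;> simp
lemma scatter_shift (ps : List Int) (vs : List Int) (x : Int) (rt : List Int)
    (h : ∀ p ∈ ps, 0 ≤ p) :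
    scatter (ps.map (fun p => p + 1)) vs (x :: rt) = x :: scatter ps vs rt := by
  induction ps generalizing vs rt with
  | nil => simp [scatter]
  | cons p ps ih =>
    cases vs with
    | nil => simp [scatter]
    | cons v vt =>
      have hp : 0 ≤ p := h p (by simp)
      have hstep : PySem.List.pySetD (x :: rt) (p + 1) v = x :: PySem.List.pySetD rt p v := by
        rw [PySem.List.pySetD_of_nonneg (x :: rt) v (by omega : (0:Int) ≤ p + 1),
            PySem.List.pySetD_of_nonneg rt v hp]
        have h2 : (p + 1).toNat = p.toNat + 1 := by omega
        simp [h2]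
      simp only [scatter, List.map_cons, List.zip_cons_cons, List.foldl_cons]
      rw [hstep]
      exact ih vt (PySem.List.pySetD rt p v) (fun q hq => h q (by simp [hq]))
lemma scatter_core : ∀ (ns e o : List Int),
    (ns.filter (fun x => PySem.Int.mod x 2 == 0)).length ≤ e.length →
    (ns.filter (fun x => PySem.Int.mod x 2 != 0)).length ≤ o.length →
    scatter (posOf (fun x => PySem.Int.mod x 2 != 0) ns) o
      (scatter (posOf (fun x => PySem.Int.mod x 2 == 0) ns) e
        (List.replicate ns.length 0)) = solveLoop ns e o := by
  intro ns
  induction ns with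
  | nil => intro e o _ _; simp [posOf_nil, scatter, solveLoop]
  | cons n t ih =>
    intro e o he ho
    rw [posOf_cons, posOf_cons]
    have hrep : List.replicate (n :: t).length (0:Int) = 0 :: List.replicate t.length 0 := by
      simp [List.replicate]
    rw [hrep]
    cases hq : (PySem.Int.mod n 2 == 0) with
    | true =>
      have hq' : (PySem.Int.mod n 2 != 0) = false := by simp only [bne, hq, Bool.not_true]
      simp only [List.filter_cons, hq, hq', Bool.false_eq_true, if_true, if_false,
        List.length_cons] at he ho
      obtain ⟨hd, et, rfl⟩ : ∃ hd et, e = hd :: et := by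
        cases e with
        | nil => simp at he
        | cons a b => exact ⟨a, b, rfl⟩
      simp only [hq', Bool.false_eq_true, if_true, if_false, List.nil_append,
        List.singleton_append]
      have hstep0 : scatter ((0:Int) :: (posOf (fun x => PySem.Int.mod x 2 == 0) t).map (fun p => p + 1))
          (hd :: et) (0 :: List.replicate t.length 0)
          = scatter ((posOf (fun x => PySem.Int.mod x 2 == 0) t).map (fun p => p + 1)) et
            (hd :: List.replicate t.length 0) := by
        simp [scatter, PySem.List.pySetD_of_nonneg]
      rw [hstep0, scatter_shift _ _ _ _ (posOf_nonneg _ _), scatter_shift _ _ _ _ (posOf_nonneg _ _)]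
      rw [ih et o (by simp only [List.length_cons] at he; omega) ho]
      have hget : PySem.List.pyGetD (hd :: et) 0 0 = hd := by
        simp [PySem.List.pyGetD_of_nonneg]
      simp only [solveLoop, hq, if_true, hget, List.tail_cons]
    | false =>
      have hq' : (PySem.Int.mod n 2 != 0) = true := by simp only [bne, hq, Bool.not_false]
      simp only [List.filter_cons, hq, hq', Bool.false_eq_true, if_true, if_false,
        List.length_cons] at he ho
      obtain ⟨hd, ot, rfl⟩ : ∃ hd ot, o = hd :: ot := by
        cases o with
        | nil => simp at ho
        | cons a b => exact ⟨a, b, rfl⟩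
      simp only [hq', Bool.false_eq_true, if_true, if_false, List.nil_append,
        List.singleton_append]
      rw [scatter_shift _ _ _ _ (posOf_nonneg _ _)]
      have hstep0 : scatter ((0:Int) :: (posOf (fun x => PySem.Int.mod x 2 != 0) t).map (fun p => p + 1))
          (hd :: ot)
          (0 :: scatter (posOf (fun x => PySem.Int.mod x 2 == 0) t) e (List.replicate t.length 0))
          = scatter ((posOf (fun x => PySem.Int.mod x 2 != 0) t).map (fun p => p + 1)) ot
            (hd :: scatter (posOf (fun x => PySem.Int.mod x 2 == 0) t) e (List.replicate t.length 0)) := by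
        simp [scatter, PySem.List.pySetD_of_nonneg]
      rw [hstep0, scatter_shift _ _ _ _ (posOf_nonneg _ _)]
      rw [ih e ot he (by simp only [List.length_cons] at ho; omega)]
      have hget : PySem.List.pyGetD (hd :: ot) 0 0 = hd := by
        simp [PySem.List.pyGetD_of_nonneg]
      simp only [solveLoop, hq, Bool.false_eq_true, if_false, hget, List.tail_cons]
-- ===== VERDICT (by name: the statement is the Claim_ definition above) =====
theorem solve_spec : Claim_equal_solve := by
  intro nums _
  unfold Spec_solve solve solve_alt
  have h := scatter_core nums
    (PySem.List.sorted (nums.filter (fun x => PySem.Int.mod x 2 == 0)) (fun x => x) false)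
    (PySem.List.sorted (nums.filter (fun x => PySem.Int.mod x 2 != 0)) (fun x => x) true)
    (by simp [PySem.List.length_sorted]) (by simp [PySem.List.length_sorted])
  simpa [posOf] using h.symm
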